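-- pv_equiv track=rewrite | github.com/INotCat/NCKU_2024Fall_Data_Science_Assignment | hw0/hw0_p2.py | create_collaborations
-- ===== SOURCE A (Python) =====
-- def create_collaborations(namelist: str) -> dict:
--     collaborations = {}
--     names = [name.strip() for name in namelist.split('|')]
--
--     for name in names:
--         if name not in collaborations:
--             collaborations[name] = set()
--
--         for collaborator in names:
--             if collaborator != name:
--                 collaborations[name].add(collaborator)
--                 if collaborator not in collaborations:
--                     collaborations[collaborator] = set()
--                 collaborations[collaborator].add(name)  # Ensure bidirectional collaboration
--     return collaborations
-- ===== SOURCE B (Python) =====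
-- def create_collaborations(namelist: str) -> dict:
--     collaborations = {}
--     for raw in namelist.split('|'):
--         name = raw.strip()
--         if name in collaborations:
--             continue
--         for members in collaborations.values():
--             members.add(name)
--         collaborations[name] = set(collaborations)
--     return collaborations
-- ===== Notes on version B (the rewrite author's own statement) =====
-- stated objective: alternative
-- what changed: A's nested all-pairs scan over the full (duplicate-containing) name list with bidirectional per-edge insertion is replaced by a one-pass incremental construction: each new unique name is appended to every existing member's set and gets the set of previously seen names as its own entry.
import Mathlib
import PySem

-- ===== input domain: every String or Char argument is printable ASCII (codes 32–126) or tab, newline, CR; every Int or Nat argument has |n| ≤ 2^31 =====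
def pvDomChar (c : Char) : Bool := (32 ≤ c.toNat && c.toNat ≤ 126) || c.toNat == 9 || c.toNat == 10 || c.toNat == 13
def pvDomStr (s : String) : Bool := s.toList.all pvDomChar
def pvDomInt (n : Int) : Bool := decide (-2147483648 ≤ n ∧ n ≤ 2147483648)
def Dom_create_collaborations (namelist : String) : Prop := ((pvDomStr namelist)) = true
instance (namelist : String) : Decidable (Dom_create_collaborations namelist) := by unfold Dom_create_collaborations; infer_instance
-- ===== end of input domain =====

-- B replaces A's nested all-pairs scan by a one-pass incremental build: each new unique
-- name is added to every existing member's set and receives the previously seen names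
-- as its own set (objective: alternative).

-- ===== PORT A =====
-- 'if name not in collaborations: collaborations[name] = set()'
def pvEnsure (d : PySem.Dict String (PySem.Set String)) (k : String) :
    PySem.Dict String (PySem.Set String) :=
  if d.contains k then d else d.insert k PySem.Set.empty

-- body of the inner 'for collaborator in names' loop;
-- 'collaborations[name].add(collaborator)' is Dict.modify with default [] (exact here: the key is always present when reached)
def pvABody (name : String) (d : PySem.Dict String (PySem.Set String)) (collaborator : String) :
    PySem.Dict String (PySem.Set String) :=
  if collaborator != name then
    let d := d.modify name PySem.Set.empty (fun s => s.add collaborator)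
    let d := pvEnsure d collaborator
    d.modify collaborator PySem.Set.empty (fun s => s.add name)
  else d

def pvAInner (names : List String) (name : String) (d : PySem.Dict String (PySem.Set String)) :
    PySem.Dict String (PySem.Set String) :=
  names.foldl (pvABody name) d

def create_collaborations (namelist : String) : List (String × List String) :=
  let names := ((PySem.Str.split? namelist "|").getD []).map PySem.Str.strip
  (names.foldl (fun d name => pvAInner names name (pvEnsure d name)) PySem.Dict.empty).items

-- ===== PORT B =====
-- one step of B's loop: skip a seen name; otherwise add it to every existing member's set
-- ('for members in collaborations.values(): members.add(name)' — ported as a modify fold over the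
-- keys in insertion order, exact: Python dict iteration IS insertion order and each key is present)
-- and then 'collaborations[name] = set(collaborations)'.
def pvBStep (d : PySem.Dict String (PySem.Set String)) (name : String) :
    PySem.Dict String (PySem.Set String) :=
  if d.contains name then d
  else
    let d2 := d.keys.foldl (fun acc k => acc.modify k PySem.Set.empty (fun s => s.add name)) d
    d2.insert name (PySem.Set.ofList d2.keys)

def create_collaborations_alt (namelist : String) : List (String × List String) :=
  (((PySem.Str.split? namelist "|").getD []).map PySem.Str.strip).foldl pvBStep
    PySem.Dict.empty |>.items

-- ===== PRECONDITION & SPEC =====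
def Spec_create_collaborations (namelist : String) (out : List (String × List String)) : Prop := out = create_collaborations_alt namelist
instance (namelist : String) (out : List (String × List String)) : Decidable (Spec_create_collaborations namelist out) := by unfold Spec_create_collaborations; infer_instance

-- ===== CLAIM (what is proved, stated in full; the proofs are below) =====
def Claim_equal_create_collaborations : Prop := ∀ (namelist : String), Dom_create_collaborations namelist → Spec_create_collaborations namelist (create_collaborations namelist)

-- ===== LEMMAS AND PROOFS =====

lemma pv_ensure_keys (d : PySem.Dict String (PySem.Set String)) (k : String) :
    (pvEnsure d k).keys = PySem.Set.add d.keys k := by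
  rw [pvEnsure, PySem.Set.add_eq_ite]
  by_cases h : d.contains k
  · rw [if_pos h, if_pos ((PySem.Dict.contains_iff_mem_keys d k).mp h)]
  · rw [if_neg h, if_neg (fun hm => h ((PySem.Dict.contains_iff_mem_keys d k).mpr hm)),
      PySem.Dict.keys_insert_of_not_contains _ _ (by simpa using h)]

lemma pv_ensure_getD (d : PySem.Dict String (PySem.Set String)) (k k' : String) :
    (pvEnsure d k).getD k' [] = d.getD k' [] := by
  rw [pvEnsure]
  by_cases h : d.contains k
  · rw [if_pos h]
  · rw [if_neg h, PySem.Dict.getD_insert]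
    split_ifs with he
    · subst he; rw [PySem.Dict.getD_of_not_contains _ _ (by simpa using h)]; rfl
    · rfl

lemma pv_step_facts (n c : String) (hcn : c ≠ n) (d : PySem.Dict String (PySem.Set String))
    (hn : n ∈ d.keys) :
    (pvABody n d c).keys = PySem.Set.add d.keys c ∧
    (pvABody n d c).getD n [] = PySem.Set.add (d.getD n []) c ∧
    (pvABody n d c).getD c [] = PySem.Set.add (d.getD c []) n ∧
    ∀ k, k ≠ n → k ≠ c → (pvABody n d c).getD k [] = d.getD k [] := by
  have hbc : (c != n) = true := by simp [hcn]
  have hEq : pvABody n d c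
      = (pvEnsure (d.modify n ([] : PySem.Set String) (fun s => s.add c)) c).modify c
          ([] : PySem.Set String) (fun s => s.add n) := by
    rw [pvABody, if_pos hbc]; rfl
  rw [hEq]
  set d1 := d.modify n ([] : PySem.Set String) (fun s => s.add c) with hd1
  have hk1 : d1.keys = d.keys := by
    rw [hd1, PySem.Dict.keys_modify,
      PySem.Dict.keys_insert_of_contains _ _ ((PySem.Dict.contains_iff_mem_keys d n).mpr hn)]
  have hg1 : ∀ k', d1.getD k' [] = if k' = n then PySem.Set.add (d.getD n []) c else d.getD k' [] := by
    intro k'; rw [hd1]; exact PySem.Dict.getD_modify d n k' [] _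
  set d2 := pvEnsure d1 c with hd2
  have hk2 : d2.keys = PySem.Set.add d.keys c := by rw [hd2, pv_ensure_keys, hk1]
  have hg2 : ∀ k', d2.getD k' [] = d1.getD k' [] := fun k' => pv_ensure_getD d1 c k'
  have hcc : d2.contains c = true := by
    rw [PySem.Dict.contains_iff_mem_keys, hk2]
    exact (PySem.Set.mem_add _ _ _).mpr (Or.inr rfl)
  refine ⟨?_, ?_, ?_, ?_⟩
  · rw [PySem.Dict.keys_modify, PySem.Dict.keys_insert_of_contains _ _ hcc, hk2]
  · rw [PySem.Dict.getD_modify, if_neg (Ne.symm hcn), hg2, hg1, if_pos rfl]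
  · rw [PySem.Dict.getD_modify, if_pos rfl, hg2, hg1, if_neg hcn]
  · intro k hkn hkc
    rw [PySem.Dict.getD_modify, if_neg hkc, hg2, hg1, if_neg hkn]

lemma pv_inner_spec (n : String) (cs : List String) :
    ∀ d : PySem.Dict String (PySem.Set String), d.keys.Nodup → n ∈ d.keys →
    (pvAInner cs n d).keys.Nodup ∧
    (pvAInner cs n d).keys = PySem.Set.update d.keys (cs.filter (fun c => c != n)) ∧
    (pvAInner cs n d).getD n [] = PySem.Set.update (d.getD n []) (cs.filter (fun c => c != n)) ∧
    ∀ k, k ≠ n → (pvAInner cs n d).getD k [] =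
      (if k ∈ cs then PySem.Set.add (d.getD k []) n else d.getD k []) := by
  induction cs with
  | nil =>
    intro d hnd hn
    refine ⟨hnd, by simp [pvAInner, PySem.Set.update_nil], by simp [pvAInner, PySem.Set.update_nil], ?_⟩
    intro k _
    simp [pvAInner]
  | cons c cs ih =>
    intro d hnd hn
    by_cases hc : c = n
    · subst hc
      have hbody : pvABody c d c = d := by simp [pvABody]
      have hfold : pvAInner (c :: cs) c d = pvAInner cs c d := by
        simp [pvAInner, hbody]
      have hfilter : (c :: cs).filter (fun x => x != c) = cs.filter (fun x => x != c) := by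
        simp
      obtain ⟨h1, h2, h3, h4⟩ := ih d hnd hn
      refine ⟨hfold ▸ h1, by rw [hfold, hfilter]; exact h2, by rw [hfold, hfilter]; exact h3, ?_⟩
      intro k hk
      rw [hfold, h4 k hk]
      have : (k ∈ c :: cs) ↔ k ∈ cs := by simp [List.mem_cons, hk]
      by_cases hm : k ∈ cs
      · rw [if_pos hm, if_pos (this.mpr hm)]
      · rw [if_neg hm, if_neg (fun h => hm (this.mp h))]
    · obtain ⟨hek, hgn, hgc, hgo⟩ := pv_step_facts n c (hc) d hn
      have hend : (pvABody n d c).keys.Nodup := hek ▸ PySem.Set.nodup_add _ _ hnd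
      have henm : n ∈ (pvABody n d c).keys := by
        rw [hek]; exact (PySem.Set.mem_add _ _ _).mpr (Or.inl hn)
      obtain ⟨h1, h2, h3, h4⟩ := ih (pvABody n d c) hend henm
      have hfold : pvAInner (c :: cs) n d = pvAInner cs n (pvABody n d c) := by
        simp [pvAInner]
      have hbcn : ((fun x => x != n) c) = true := by simp [hc]
      have hfilter : (c :: cs).filter (fun x => x != n) = c :: cs.filter (fun x => x != n) :=
        List.filter_cons_of_pos hbcn
      refine ⟨hfold ▸ h1, ?_, ?_, ?_⟩
      · rw [hfold, h2, hek, hfilter, PySem.Set.update_cons]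
      · rw [hfold, h3, hgn, hfilter, PySem.Set.update_cons]
      · intro k hk
        rw [hfold, h4 k hk]
        by_cases hkc : k = c
        · subst hkc
          rw [if_pos (List.mem_cons_self), hgc]
          by_cases hm : k ∈ cs
          · rw [if_pos hm, PySem.Set.add_of_mem ((PySem.Set.mem_add _ _ _).mpr (Or.inr rfl))]
          · rw [if_neg hm]
        · rw [hgo k hk hkc]
          have : (k ∈ c :: cs) ↔ k ∈ cs := by simp [List.mem_cons, hkc]
          by_cases hm : k ∈ cs
          · rw [if_pos hm, if_pos (this.mpr hm)]
          · rw [if_neg hm, if_neg (fun h => hm (this.mp h))]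

lemma pv_ofList_filter (xs : List String) (q : String → Bool) :
    PySem.Set.ofList (xs.filter q) = (PySem.Set.ofList xs).filter q := by
  induction xs with
  | nil => rfl
  | cons x xs ih =>
    by_cases hq : q x
    · rw [List.filter_cons_of_pos hq, PySem.Set.ofList_cons, PySem.Set.ofList_cons,
        List.filter_cons_of_pos hq, ih]
      simp only [PySem.Set.discard, List.filter_filter]
      congr 1
      apply List.filter_congr
      intro a _
      exact Bool.and_comm _ _
    · rw [List.filter_cons_of_neg hq, PySem.Set.ofList_cons, List.filter_cons_of_neg hq, ih]
      simp only [PySem.Set.discard, List.filter_filter]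
      apply List.filter_congr
      intro a _
      by_cases hax : a = x
      · subst hax; simp [hq]
      · simp [hax]

lemma pv_update_of_subset (s : PySem.Set String) (xs : List String)
    (h : ∀ x ∈ xs, x ∈ s) : s.update xs = s := by
  rw [PySem.Set.update_eq_append_filter]
  have hnil : List.filter (fun y => !s.contains y) (PySem.Set.ofList xs) = [] := by
    rw [List.filter_eq_nil_iff]
    intro a ha
    simpa using h a ((PySem.Set.mem_ofList xs a).mp ha)
  rw [hnil, List.append_nil]

-- discard IS a filter by the same predicate as `!= n`
lemma pv_discard_eq_filter (s : PySem.Set String) (n : String) :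
    PySem.Set.discard s n = s.filter (fun y => y != n) := rfl

lemma pv_filter_ne_idem (s : List String) (n : String) :
    (s.filter (fun y => y != n)).filter (fun y => y != n) = s.filter (fun y => y != n) := by
  rw [List.filter_filter]
  apply List.filter_congr
  intro a _
  exact Bool.and_self _

lemma pv_ofList_cons_filter (n : String) (xs : List String) :
    PySem.Set.ofList (n :: xs.filter (fun y => y != n)) = PySem.Set.ofList (n :: xs) := by
  rw [PySem.Set.ofList_cons, PySem.Set.ofList_cons, pv_ofList_filter,
    pv_discard_eq_filter, pv_discard_eq_filter, pv_filter_ne_idem]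

def pvVal (ns p : List String) (k : String) : List String :=
  if k ∈ p then (PySem.Set.ofList ns).filter (fun x => x != k)
  else if k ∈ ns then PySem.Set.ofList p
  else []

def pvInv (ns p : List String) (d : PySem.Dict String (PySem.Set String)) : Prop :=
  d.keys.Nodup ∧
  d.keys = (if p = [] then ([] : List String) else PySem.Set.ofList ns) ∧
  ∀ k, d.getD k [] = pvVal ns p k

lemma pv_filter_split (ns p rest : List String) (n : String) (h : ns = p ++ n :: rest)
    (hnp : n ∉ p) : ns.filter (fun y => y != n) = p ++ rest.filter (fun y => y != n) := by
  subst h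
  rw [List.filter_append, List.filter_cons_of_neg (by simp)]
  congr 1
  apply List.filter_eq_self.mpr
  intro a ha
  simp only [bne_iff_ne, ne_eq]
  exact fun hc => hnp (hc ▸ ha)

lemma pv_outer_step (ns p rest : List String) (n : String)
    (h : ns = p ++ n :: rest) (d : PySem.Dict String (PySem.Set String))
    (hInv : pvInv ns p d) : pvInv ns (p ++ [n]) (pvAInner ns n (pvEnsure d n)) := by
  obtain ⟨hnd, hkeys, hget⟩ := hInv
  have hnns : n ∈ ns := h ▸ List.mem_append_right _ List.mem_cons_self
  have hek : (pvEnsure d n).keys = PySem.Set.add d.keys n := pv_ensure_keys d n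
  have heg : ∀ k', (pvEnsure d n).getD k' [] = d.getD k' [] := pv_ensure_getD d n
  have hend : (pvEnsure d n).keys.Nodup := hek ▸ PySem.Set.nodup_add _ _ hnd
  have henm : n ∈ (pvEnsure d n).keys := hek ▸ (PySem.Set.mem_add _ _ _).mpr (Or.inr rfl)
  obtain ⟨h1, h2, h3, h4⟩ := pv_inner_spec n ns (pvEnsure d n) hend henm
  have hpn_ne : (p ++ [n]) ≠ [] := by simp
  refine ⟨h1, ?_, ?_⟩
  · -- keys
    rw [h2, hek, if_neg hpn_ne]
    by_cases hp : p = []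
    · subst hp
      have hns : ns = n :: rest := h
      have hdk : d.keys = [] := by rwa [if_pos rfl] at hkeys
      rw [hdk, PySem.Set.add_eq_ite, if_neg (List.not_mem_nil), List.nil_append]
      have h1n : ([n] : List String) = PySem.Set.ofList [n] :=
        (PySem.Set.ofList_eq_self_of_nodup _ (List.nodup_singleton n)).symm
      rw [h1n, ← PySem.Set.ofList_append]
      show PySem.Set.ofList (n :: List.filter (fun y => y != n) ns) = PySem.Set.ofList ns
      rw [hns, List.filter_cons_of_neg (by simp), pv_ofList_cons_filter]
    · rw [if_neg hp] at hkeys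
      rw [hkeys, PySem.Set.add_of_mem ((PySem.Set.mem_ofList _ _).mpr hnns)]
      exact pv_update_of_subset _ _ (fun x hx =>
        (PySem.Set.mem_ofList _ _).mpr (List.mem_of_mem_filter hx))
  · -- values
    intro k
    by_cases hkn : k = n
    · have hR : pvVal ns (p ++ [n]) n = (PySem.Set.ofList ns).filter (fun x => x != n) := by
        rw [pvVal, if_pos (List.mem_append_right _ (by simp))]
      rw [hkn, h3, heg, hget, hR]
      by_cases hkp : n ∈ p
      · have hL : pvVal ns p n = (PySem.Set.ofList ns).filter (fun x => x != n) := by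
          rw [pvVal, if_pos hkp]
        rw [hL]
        exact pv_update_of_subset _ _ (fun x hx => by
          rcases List.mem_filter.mp hx with ⟨hx1, hx2⟩
          exact List.mem_filter.mpr ⟨(PySem.Set.mem_ofList _ _).mpr hx1, hx2⟩)
      · have hL : pvVal ns p n = PySem.Set.ofList p := by
          rw [pvVal, if_neg hkp, if_pos hnns]
        rw [hL]
        by_cases hp : p = []
        · subst hp
          rw [PySem.Set.ofList_nil]
          show PySem.Set.update ([] : PySem.Set String) _ = _
          rw [PySem.Set.update_nil_left, pv_ofList_filter]
        · rw [pv_filter_split ns p rest n h hkp, PySem.Set.update_append,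
            pv_update_of_subset _ p (fun x hx => (PySem.Set.mem_ofList _ _).mpr hx),
            ← PySem.Set.ofList_append, ← pv_filter_split ns p rest n h hkp, pv_ofList_filter]
    · rw [h4 k hkn, heg, hget]
      have hmm : k ∈ p ++ [n] ↔ k ∈ p := by simp [hkn]
      by_cases hkns : k ∈ ns
      · rw [if_pos hkns]
        by_cases hkp : k ∈ p
        · have hL : pvVal ns p k = (PySem.Set.ofList ns).filter (fun x => x != k) := by
            rw [pvVal, if_pos hkp]
          have hR : pvVal ns (p ++ [n]) k = (PySem.Set.ofList ns).filter (fun x => x != k) := by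
            rw [pvVal, if_pos (hmm.mpr hkp)]
          rw [hL, hR]
          apply PySem.Set.add_of_mem
          refine List.mem_filter.mpr ⟨(PySem.Set.mem_ofList _ _).mpr hnns, ?_⟩
          simp only [bne_iff_ne, ne_eq]
          exact fun hc => hkn hc.symm
        · have hL : pvVal ns p k = PySem.Set.ofList p := by
            rw [pvVal, if_neg hkp, if_pos hkns]
          have hR : pvVal ns (p ++ [n]) k = PySem.Set.ofList (p ++ [n]) := by
            rw [pvVal, if_neg (fun hm => hkp (hmm.mp hm)), if_pos hkns]
          rw [hL, hR, PySem.Set.ofList_append_singleton]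
      · have hkp : k ∉ p := fun hm => hkns (h ▸ List.mem_append_left _ hm)
        have hL : pvVal ns p k = [] := by rw [pvVal, if_neg hkp, if_neg hkns]
        have hR : pvVal ns (p ++ [n]) k = [] := by
          rw [pvVal, if_neg (fun hm => hkp (hmm.mp hm)), if_neg hkns]
        rw [if_neg hkns, hL, hR]

lemma pv_outer_fold (ns : List String) :
    ∀ (rest p : List String) (d : PySem.Dict String (PySem.Set String)),
    ns = p ++ rest → pvInv ns p d →
    pvInv ns ns (rest.foldl (fun d name => pvAInner ns name (pvEnsure d name)) d) := by
  intro rest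
  induction rest with
  | nil =>
    intro p d h hInv
    simpa [List.foldl_nil, ← h] using (by rw [List.append_nil] at h; exact h ▸ hInv)
  | cons n rest ih =>
    intro p d h hInv
    rw [List.foldl_cons]
    exact ih (p ++ [n]) _ (by simpa using h) (pv_outer_step ns p rest n h d hInv)

lemma pv_main (ns : List String) :
    (ns.foldl (fun d name => pvAInner ns name (pvEnsure d name)) PySem.Dict.empty).items
    = (PySem.Set.ofList ns).map
        (fun k => (k, PySem.Set.ofList ((PySem.Set.ofList ns).filter (fun x => x != k)))) := by
  have hInv0 : pvInv ns [] PySem.Dict.empty := by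
    refine ⟨by simp, by simp [PySem.Dict.keys_empty], ?_⟩
    intro k
    rw [PySem.Dict.getD_empty, pvVal]
    simp
  obtain ⟨h1, h2, h3⟩ := pv_outer_fold ns ns [] PySem.Dict.empty (by simp) hInv0
  rw [PySem.Dict.items_eq_map_keys _ h1 []]
  by_cases hne : ns = []
  · subst hne
    simp [PySem.Dict.keys_empty]
  · rw [if_neg hne] at h2
    rw [h2]
    apply List.map_congr_left
    intro k hk
    have hkns : k ∈ ns := (PySem.Set.mem_ofList _ _).mp hk
    have hval : pvVal ns ns k = (PySem.Set.ofList ns).filter (fun x => x != k) := by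
      rw [pvVal, if_pos hkns]
    rw [h3 k, hval,
      PySem.Set.ofList_eq_self_of_nodup _ ((PySem.Set.nodup_ofList ns).filter _)]

-- ===== B-side lemmas =====

-- the modify fold of pvBStep: keys unchanged, each present key's set gains `x`
lemma pvB_fold_getD (x : String) (ks : List String) :
    ∀ (d : PySem.Dict String (PySem.Set String)), ks.Nodup →
    (∀ k', (ks.foldl (fun acc k => acc.modify k PySem.Set.empty (fun s => s.add x)) d).getD k' []
      = if k' ∈ ks then PySem.Set.add (d.getD k' []) x else d.getD k' []) := by
  induction ks with
  | nil => intro d _ k'; simp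
  | cons k ks ih =>
    intro d hnd k'
    rw [List.foldl_cons]
    have hkks : k ∉ ks := (List.nodup_cons.mp hnd).1
    rw [ih _ (List.nodup_cons.mp hnd).2 k']
    simp only [show (PySem.Set.empty : PySem.Set String) = [] from rfl]
    by_cases hk' : k' ∈ ks
    · have hne : k' ≠ k := fun h => hkks (h ▸ hk')
      rw [if_pos hk', if_pos (List.mem_cons_of_mem _ hk'), PySem.Dict.getD_modify, if_neg hne]
    · rw [if_neg hk', PySem.Dict.getD_modify]
      by_cases he : k' = k
      · rw [if_pos he, if_pos (by simp [he])]
        subst he; rfl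
      · rw [if_neg he, if_neg (by simp [he, hk'])]

lemma pvB_fold_keys (x : String) (ks : List String)
    (d : PySem.Dict String (PySem.Set String)) (h : ∀ k ∈ ks, k ∈ d.keys) :
    (ks.foldl (fun acc k => acc.modify k PySem.Set.empty (fun s => s.add x)) d).keys = d.keys := by
  rw [PySem.Dict.keys_foldl_modify]
  exact pv_update_of_subset _ _ h

-- invariant of B's fold: after processing the prefix q, keys = set(q) and each member's
-- set is the other members
def pvInvB (q : List String) (d : PySem.Dict String (PySem.Set String)) : Prop :=
  d.keys.Nodup ∧ d.keys = PySem.Set.ofList q ∧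
  ∀ k, d.getD k [] =
    (if k ∈ q then (PySem.Set.ofList q).filter (fun x => x != k) else [])

lemma pvB_step (q : List String) (n : String) (d : PySem.Dict String (PySem.Set String))
    (hInv : pvInvB q d) : pvInvB (q ++ [n]) (pvBStep d n) := by
  obtain ⟨hnd, hkeys, hget⟩ := hInv
  by_cases hc : d.contains n
  · have hnq : n ∈ q := by
      have := (PySem.Dict.contains_iff_mem_keys d n).mp hc
      rw [hkeys] at this
      exact (PySem.Set.mem_ofList _ _).mp this
    have hof : PySem.Set.ofList (q ++ [n]) = PySem.Set.ofList q := by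
      rw [PySem.Set.ofList_append_singleton,
        PySem.Set.add_of_mem ((PySem.Set.mem_ofList _ _).mpr hnq)]
    rw [pvBStep, if_pos hc]
    refine ⟨hnd, by rw [hkeys, hof], ?_⟩
    intro k
    rw [hget k, hof]
    by_cases hk : k ∈ q
    · rw [if_pos hk, if_pos (List.mem_append_left _ hk)]
    · rw [if_neg hk, if_neg (by simp [hk]; exact fun h => hk (h ▸ hnq))]
  · have hnq : n ∉ q := fun h => hc ((PySem.Dict.contains_iff_mem_keys d n).mpr
      (hkeys ▸ (PySem.Set.mem_ofList _ _).mpr h))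
    rw [pvBStep, if_neg hc]
    set d2 := d.keys.foldl (fun acc k => acc.modify k PySem.Set.empty (fun s => s.add n)) d
      with hd2
    have hk2 : d2.keys = d.keys := pvB_fold_keys n d.keys d (fun k hk => hk)
    have hg2 : ∀ k', d2.getD k' [] =
        if k' ∈ d.keys then PySem.Set.add (d.getD k' []) n else d.getD k' [] :=
      pvB_fold_getD n d.keys d hnd
    have hc2 : d2.contains n = false := by
      rw [← Bool.not_eq_true, PySem.Dict.contains_iff_mem_keys, hk2]
      intro hm
      exact hc ((PySem.Dict.contains_iff_mem_keys d n).mpr hm)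
    have hof : PySem.Set.ofList (q ++ [n]) = PySem.Set.ofList q ++ [n] := by
      rw [PySem.Set.ofList_append_singleton,
        PySem.Set.add_of_not_mem (fun h => hnq ((PySem.Set.mem_ofList _ _).mp h))]
    refine ⟨?_, ?_, ?_⟩
    · rw [PySem.Dict.keys_insert_of_not_contains _ _ hc2, hk2, hkeys, ← hof]
      exact PySem.Set.nodup_ofList _
    · rw [PySem.Dict.keys_insert_of_not_contains _ _ hc2, hk2, hkeys, hof]
    · intro k
      rw [PySem.Dict.getD_insert]
      by_cases hkn : k = n
      · subst hkn
        rw [if_pos rfl, if_pos (List.mem_append_right _ List.mem_cons_self), hk2, hkeys, hof,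
          PySem.Set.ofList_eq_self_of_nodup _ (PySem.Set.nodup_ofList q),
          List.filter_append, List.filter_cons_of_neg (by simp), List.filter_nil,
          List.append_nil, List.filter_eq_self.mpr]
        intro a ha
        simp only [bne_iff_ne, ne_eq]
        exact fun h => hnq (h ▸ (PySem.Set.mem_ofList _ _).mp ha)
      · rw [if_neg hkn, hg2 k, hget k, hkeys]
        by_cases hkq : k ∈ q
        · rw [if_pos ((PySem.Set.mem_ofList _ _).mpr hkq), if_pos hkq,
            if_pos (List.mem_append_left _ hkq), hof, List.filter_append,
            List.filter_cons_of_pos (by simp [Ne.symm hkn]), List.filter_nil,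
            PySem.Set.add_of_not_mem (fun h => hnq ((PySem.Set.mem_ofList _ _).mp
              (List.mem_of_mem_filter h)))]
        · rw [if_neg (fun h => hkq ((PySem.Set.mem_ofList _ _).mp h)), if_neg hkq,
            if_neg (by simp [hkq, hkn])]

lemma pvB_main (ns : List String) :
    (ns.foldl pvBStep PySem.Dict.empty).items
    = (PySem.Set.ofList ns).map
        (fun k => (k, (PySem.Set.ofList ns).filter (fun x => x != k))) := by
  have hInv : ∀ (rest q : List String) (d : PySem.Dict String (PySem.Set String)),
      pvInvB q d → pvInvB (q ++ rest) (rest.foldl pvBStep d) := by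
    intro rest
    induction rest with
    | nil => intro q d h; simpa using h
    | cons n rest ih =>
      intro q d h
      rw [List.foldl_cons]
      have := ih (q ++ [n]) _ (pvB_step q n d h)
      simpa using this
  have hInv0 : pvInvB [] PySem.Dict.empty := by
    refine ⟨by simp, by simp [PySem.Dict.keys_empty], ?_⟩
    intro k; simp [PySem.Dict.getD_empty]
  obtain ⟨h1, h2, h3⟩ := by simpa using hInv ns [] PySem.Dict.empty hInv0
  rw [PySem.Dict.items_eq_map_keys _ h1 [], h2]
  apply List.map_congr_left
  intro k hk
  rw [h3 k, if_pos ((PySem.Set.mem_ofList _ _).mp hk)]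

-- ===== VERDICT (by name: the statement is the Claim_ definition above) =====
theorem create_collaborations_spec : Claim_equal_create_collaborations := by
  intro namelist _
  unfold Spec_create_collaborations create_collaborations create_collaborations_alt
  rw [pv_main, pvB_main]
  apply List.map_congr_left
  intro k hk
  rw [PySem.Set.ofList_eq_self_of_nodup _ ((PySem.Set.nodup_ofList _).filter _)]
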